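-- pv_equiv track=rewrite | github.com/stephenfeagin/PyAdventOfCode | 2018/02/day_02.py | part_1
-- ===== SOURCE A (Python) =====
-- from collections import defaultdict
--
-- def part_1(data):
--     two_times = 0
--     three_times = 0
--     for line in data:
--         letter_frequency = defaultdict(int)
--         for letter in line:
--             letter_frequency[letter] += 1
--         if any(val == 2 for val in letter_frequency.values()):
--             two_times += 1
--         if any(val == 3 for val in letter_frequency.values()):
--             three_times += 1
--     return two_times * three_times
-- ===== SOURCE B (Python) =====
-- def part_1(data):
--     two_times = 0
--     three_times = 0
--     for line in data:
--         chars = sorted(line)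
--         runs = []
--         run = 0
--         for i, ch in enumerate(chars):
--             run += 1
--             if i + 1 == len(chars) or chars[i + 1] != ch:
--                 runs.append(run)
--                 run = 0
--         if 2 in runs:
--             two_times += 1
--         if 3 in runs:
--             three_times += 1
--     return two_times * three_times
-- ===== Notes on version B (the rewrite author's own statement) =====
-- stated objective: faster
-- what changed: Per line, the defaultdict letter-frequency loop is replaced by sorting the characters and scanning consecutive runs, collecting run lengths and testing whether 2 or 3 is among them.
import Mathlib
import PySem

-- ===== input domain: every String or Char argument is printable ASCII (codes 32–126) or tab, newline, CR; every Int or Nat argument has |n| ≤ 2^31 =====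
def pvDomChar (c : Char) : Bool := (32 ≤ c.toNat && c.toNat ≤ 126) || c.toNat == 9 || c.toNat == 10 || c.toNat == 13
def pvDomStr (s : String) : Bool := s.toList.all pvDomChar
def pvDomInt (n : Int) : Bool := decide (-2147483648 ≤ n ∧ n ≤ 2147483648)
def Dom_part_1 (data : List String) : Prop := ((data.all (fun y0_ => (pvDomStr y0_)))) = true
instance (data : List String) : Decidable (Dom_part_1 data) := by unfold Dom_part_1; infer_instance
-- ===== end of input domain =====

-- B replaces the per-line frequency dict with sorting the line and scanning run lengths (alternative algorithm, same cost class).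

-- ===== PORT A =====
def part_1 (data : List String) : Int :=
  let st := data.foldl (fun (acc : Int × Int) line =>
    let freq := line.toList.foldl (fun (d : PySem.Dict Char Int) ch => d.modify ch 0 (· + 1)) PySem.Dict.empty
    ((if (freq.values).any (fun v => v == 2) then acc.1 + 1 else acc.1),
     (if (freq.values).any (fun v => v == 3) then acc.2 + 1 else acc.2))) (0, 0)
  st.1 * st.2

-- ===== PORT B =====
-- single pass over the sorted characters: extend the current run, flush its length when the next char differs
def runLengths : List Char → Nat → List Nat
  | [], _ => []
  | [_], run => [run + 1]
  | c :: d :: rest, run =>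
      if c = d then runLengths (d :: rest) (run + 1)
      else (run + 1) :: runLengths (d :: rest) 0

def part_1_alt (data : List String) : Int :=
  let st := data.foldl (fun (acc : Int × Int) line =>
    let runs := runLengths (PySem.List.sorted line.toList (fun x => x) false) 0
    ((if 2 ∈ runs then acc.1 + 1 else acc.1),
     (if 3 ∈ runs then acc.2 + 1 else acc.2))) (0, 0)
  st.1 * st.2

-- ===== PRECONDITION & SPEC =====
def Spec_part_1 (data : List String) (out : Int) : Prop := out = part_1_alt data
instance (data : List String) (out : Int) : Decidable (Spec_part_1 data out) := by unfold Spec_part_1; infer_instance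

-- ===== CLAIM (what is proved, stated in full; the proofs are below) =====
def Claim_equal_part_1 : Prop := ∀ (data : List String), Dom_part_1 data → Spec_part_1 data (part_1 data)

-- ===== LEMMAS AND PROOFS =====

-- A's per-line check: some dict value equals n  ↔  some character occurs n times
lemma anyVal_counter (xs : List Char) (n : Nat) :
    ((xs.foldl (fun (d : PySem.Dict Char Int) ch => d.modify ch 0 (· + 1)) PySem.Dict.empty).values.any
      (fun v => v == (n : Int))) = true ↔ ∃ c ∈ xs, xs.count c = n := by
  rw [← PySem.Dict.counter_eq_foldl]
  have h : (PySem.Dict.counter xs).values = (PySem.Set.ofList xs).map (fun k => (xs.count k : Int)) := by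
    simp [PySem.Dict.values, PySem.Dict.items_counter]
  rw [h]
  simp [List.any_eq_true, PySem.Set.mem_ofList]

lemma runLengths_replicate (c : Char) (rest : List Char)
    (h : rest = [] ∨ ∃ d t, rest = d :: t ∧ d ≠ c) :
    ∀ k run, runLengths (List.replicate (k + 1) c ++ rest) run = (run + k + 1) :: runLengths rest 0 := by
  intro k
  induction k with
  | zero =>
    intro run
    rcases h with h | ⟨d, t, rfl, hdc⟩
    · subst h; simp [runLengths]
    · simp [runLengths, (Ne.symm hdc)]
  | succ k ih =>
    intro run
    have : List.replicate (k + 1 + 1) c ++ rest = c :: (List.replicate (k + 1) c ++ rest) := by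
      simp [List.replicate]
    rw [this]
    have h2 : List.replicate (k + 1) c ++ rest = c :: (List.replicate k c ++ rest) := by
      simp [List.replicate]
    rw [h2, runLengths]
    rw [← h2, ih (run + 1), show run + 1 + k + 1 = run + (k + 1) + 1 from by omega]
    simp

lemma sorted_head_split (c : Char) :
    ∀ t : List Char, (c :: t).Pairwise (· ≤ ·) →
      ∃ j rest, t = List.replicate j c ++ rest ∧ (rest = [] ∨ ∃ d t', rest = d :: t' ∧ d ≠ c) ∧
        rest.Pairwise (· ≤ ·) ∧ c ∉ rest := by
  intro t
  induction t with
  | nil => intro _; exact ⟨0, [], by simp, Or.inl rfl, List.Pairwise.nil, by simp⟩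
  | cons d t' ih =>
    intro hp
    by_cases hdc : d = c
    · subst hdc
      have hp' : (d :: t').Pairwise (· ≤ ·) := hp.tail
      obtain ⟨j, rest, ht, hne, hs, hmem⟩ := ih hp'
      exact ⟨j + 1, rest, by simp [List.replicate, ht], hne, hs, hmem⟩
    · refine ⟨0, d :: t', by simp, Or.inr ⟨d, t', rfl, hdc⟩, hp.tail, ?_⟩
      have hcd : c ≤ d := (List.pairwise_cons.mp hp).1 d (by simp)
      have hcd' : c < d := lt_of_le_of_ne hcd (fun h => hdc (h.symm))
      intro hc
      rcases List.mem_cons.mp hc with h | h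
      · exact hdc h.symm
      · have : d ≤ c := (List.pairwise_cons.mp hp.tail).1 c h
        exact absurd (lt_of_lt_of_le hcd' this) (lt_irrefl c)

lemma mem_runLengths_sorted (n : Nat) :
    ∀ s : List Char, s.Pairwise (· ≤ ·) → (n ∈ runLengths s 0 ↔ ∃ c ∈ s, s.count c = n) := by
  suffices H : ∀ m (s : List Char), s.length ≤ m → s.Pairwise (· ≤ ·) →
      (n ∈ runLengths s 0 ↔ ∃ c ∈ s, s.count c = n) from fun s hs => H s.length s le_rfl hs
  intro m
  induction m with
  | zero =>
    intro s hlen _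
    have : s = [] := List.eq_nil_of_length_eq_zero (Nat.le_zero.mp hlen)
    subst this; simp [runLengths]
  | succ m ih =>
    intro s hlen hs
    match s with
    | [] => simp [runLengths]
    | c :: t =>
      obtain ⟨j, rest, ht, hne, hrs, hmem⟩ := sorted_head_split c t hs
      have hsplit : c :: t = List.replicate (j + 1) c ++ rest := by
        simp [List.replicate, ht]
      rw [hsplit, runLengths_replicate c rest hne j 0]
      have hlenr : rest.length ≤ m := by
        have h1 : (c :: t).length = j + 1 + rest.length := by rw [hsplit]; simp
        simp only [List.length_cons] at h1 hlen
        omega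
      have hcount_c : (List.replicate (j + 1) c ++ rest).count c = j + 1 := by
        simp [List.count_append, List.count_eq_zero_of_not_mem hmem]
      constructor
      · intro hmemn
        rcases List.mem_cons.mp hmemn with h | h
        · exact ⟨c, by simp, by rw [hcount_c]; omega⟩
        · obtain ⟨c', hc', hcnt⟩ := (ih rest hlenr hrs).mp h
          have hcc : c' ≠ c := fun he => hmem (he ▸ hc')
          have hcc' : ¬(c = c') := fun he => hcc he.symm
          refine ⟨c', by simp [hc'], ?_⟩
          simp [List.count_append, List.count_replicate, hcc', hcnt]
      · rintro ⟨c', hc', hcnt⟩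
        by_cases hcc : c' = c
        · subst hcc
          rw [hcount_c] at hcnt
          simp [← hcnt]
        · have hc'r : c' ∈ rest := by
            rcases List.mem_append.mp hc' with h | h
            · exact absurd (List.eq_of_mem_replicate h) hcc
            · exact h
          have hcc' : ¬(c = c') := fun he => hcc he.symm
          have : rest.count c' = n := by
            simp [List.count_append, List.count_replicate, hcc'] at hcnt
            exact hcnt
          exact List.mem_cons.mpr (Or.inr ((ih rest hlenr hrs).mpr ⟨c', hc'r, this⟩))

-- per-line booleans agree
lemma line_eq (line : String) (n : Nat) :
    ((line.toList.foldl (fun (d : PySem.Dict Char Int) ch => d.modify ch 0 (· + 1)) PySem.Dict.empty).values.any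
      (fun v => v == (n : Int)))
      = decide (n ∈ runLengths (PySem.List.sorted line.toList (fun x => x) false) 0) := by
  rw [Bool.eq_iff_iff, anyVal_counter, decide_eq_true_eq]
  have hperm := PySem.List.sorted_perm line.toList (fun x => x) false
  have hp : (PySem.List.sorted line.toList (fun x => x) false).Pairwise (· ≤ ·) := by
    simpa using PySem.List.sorted_pairwise line.toList (fun x => x)
  rw [mem_runLengths_sorted n _ hp]
  simp [List.Perm.mem_iff hperm, List.Perm.count_eq hperm]

-- ===== VERDICT (by name: the statement is the Claim_ definition above) =====
theorem part_1_spec : Claim_equal_part_1 := by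
  intro data _
  unfold Spec_part_1 part_1 part_1_alt
  have : ∀ (f g : Int × Int → String → Int × Int), f = g →
      (data.foldl f ((0:Int),(0:Int))).1 * (data.foldl f (0,0)).2 = (data.foldl g (0,0)).1 * (data.foldl g (0,0)).2 := by
    intro f g h; rw [h]
  apply this
  funext acc line
  have h2 := line_eq line 2
  have h3 := line_eq line 3
  norm_num at h2 h3
  dsimp only
  rw [h2, h3]
  simp only [decide_eq_true_eq]
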